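-- pv_equiv track=rewrite | github.com/Timeking23/dotfiles | .config/waybar/mediaplayer.py | build_bar
-- ===== SOURCE A (Python) =====
-- TOTAL_STEPS = 10
--
-- HEART       = '♡'
--
-- FLAT        = 'ـ'
--
-- S1          = 'ﮩ٨ـ'
--
-- S2          = 'ﮩﮩ٨ـ'
--
-- def build_bar(step):
--     """Build heart-based progress bar"""
--     step = min(max(step, 0), TOTAL_STEPS - 1)
--     segments = []
--     for j in range(TOTAL_STEPS):
--         if j < step:
--             segments.append(S1 if j % 2 == 0 else S2)
--         else:
--             segments.append(FLAT)
--     segments[step] = HEART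
--     # Use LTR/PDF markers for proper display in Waybar
--     return '\u202d' + ''.join(segments) + '\u202c'
-- ===== SOURCE B (Python) =====
-- TOTAL_STEPS = 10
-- HEART       = '♡'
-- FLAT        = 'ـ'
-- S1          = 'ﮩ٨ـ'
-- S2          = 'ﮩﮩ٨ـ'
--
-- # Precompute all TOTAL_STEPS possible bars once, growing the wave prefix
-- # incrementally; build_bar is then a clamped table lookup.
-- _BARS = []
-- _pre = ''
-- for _s in range(TOTAL_STEPS):
--     _BARS.append('\u202d' + _pre + HEART + FLAT * (TOTAL_STEPS - _s - 1) + '\u202c')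
--     _pre += S1 if _s % 2 == 0 else S2
--
-- def build_bar(step):
--     """Build heart-based progress bar"""
--     return _BARS[min(max(step, 0), TOTAL_STEPS - 1)]
-- ===== Notes on version B (the rewrite author's own statement) =====
-- stated objective: alternative
-- what changed: B precomputes a table of all TOTAL_STEPS possible bars once (growing the wave prefix incrementally and filling the tail by string multiplication) and answers each call by a clamped constant-time table lookup, instead of A's per-call segment-list build with an index overwrite.
import Mathlib
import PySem

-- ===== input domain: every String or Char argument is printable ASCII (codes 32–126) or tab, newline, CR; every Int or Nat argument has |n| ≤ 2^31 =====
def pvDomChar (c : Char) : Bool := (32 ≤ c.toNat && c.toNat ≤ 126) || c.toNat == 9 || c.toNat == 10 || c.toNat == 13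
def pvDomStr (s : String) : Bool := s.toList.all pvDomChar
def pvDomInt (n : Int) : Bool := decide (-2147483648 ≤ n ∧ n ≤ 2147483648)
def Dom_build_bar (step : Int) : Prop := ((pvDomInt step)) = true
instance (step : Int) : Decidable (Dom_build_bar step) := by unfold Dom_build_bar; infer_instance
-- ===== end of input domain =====

-- B precomputes the table of all 10 possible bars once and answers by a clamped
-- table lookup, instead of A's per-call segment-list build with an index overwrite.

def pvTOTAL_STEPS : Int := 10
def pvHEART : String := "♡"
def pvFLAT : String := "ـ"
def pvS1 : String := "ﮩ٨ـ"
def pvS2 : String := "ﮩﮩ٨ـ"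

-- ===== PORT A =====
def build_bar (step : Int) : String :=
  let step := min (max step 0) (pvTOTAL_STEPS - 1)
  let segments := (PySem.List.pyRange 0 pvTOTAL_STEPS 1).foldl
    (fun acc j => acc ++ [if j < step then (if PySem.Int.mod j 2 = 0 then pvS1 else pvS2) else pvFLAT]) []
  -- segments[step] = HEART: step is clamped to 0 ≤ step ≤ 9, so Python's index assignment is List.set at step.toNat
  let segments := segments.set step.toNat pvHEART
  "\u202d" ++ PySem.Str.join "" segments ++ "\u202c"

-- ===== PORT B =====
-- FLAT * n (Python string repetition; n ≥ 0 in every use here)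
def pvStrMul (s : String) (n : Int) : String := PySem.Str.join "" (List.replicate n.toNat s)

-- the module-level table _BARS: one fold over range(TOTAL_STEPS) carrying (bars, pre)
def pvBARS : List String :=
  ((PySem.List.pyRange 0 pvTOTAL_STEPS 1).foldl
    (fun (st : List String × String) s =>
      (st.1 ++ ["\u202d" ++ st.2 ++ pvHEART ++ pvStrMul pvFLAT (pvTOTAL_STEPS - s - 1) ++ "\u202c"],
       st.2 ++ (if PySem.Int.mod s 2 = 0 then pvS1 else pvS2)))
    ([], "")).1

def build_bar_alt (step : Int) : String :=
  -- _BARS[idx]: idx is clamped into 0..9 and the table has 10 entries, so the Python index is always valid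
  (PySem.List.pyGet? pvBARS (min (max step 0) (pvTOTAL_STEPS - 1))).getD ""

-- ===== PRECONDITION & SPEC =====
def Spec_build_bar (step : Int) (out : String) : Prop := out = build_bar_alt step
instance (step : Int) (out : String) : Decidable (Spec_build_bar step out) := by unfold Spec_build_bar; infer_instance

-- ===== CLAIM (what is proved, stated in full; the proofs are below) =====
def Claim_equal_build_bar : Prop := ∀ (step : Int), Dom_build_bar step → Spec_build_bar step (build_bar step)

-- ===== LEMMAS AND PROOFS =====

-- ===== VERDICT (by name: the statement is the Claim_ definition above) =====
theorem build_bar_spec : Claim_equal_build_bar := by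
  intro step _
  unfold Spec_build_bar build_bar build_bar_alt
  have h0 : (0:Int) ≤ min (max step 0) (pvTOTAL_STEPS - 1) := by unfold pvTOTAL_STEPS; omega
  have h9 : min (max step 0) (pvTOTAL_STEPS - 1) ≤ 9 := by unfold pvTOTAL_STEPS; omega
  generalize hc : min (max step 0) (pvTOTAL_STEPS - 1) = c at h0 h9 ⊢
  interval_cases c <;> decide
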